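-- pv_equiv track=rewrite | github.com/Jiu-xiao/XRDAP-SWD-Probe | src/vcd_to_png.py | rise_edges
-- ===== SOURCE A (Python) =====
-- def normalize_1bit_val(v):
--     if v is None:
--         return 'x'
--     s = str(v)
--     if s in ('0', '1'):
--         return s
--     if s in ('x', 'X'):
--         return 'x'
--     if s in ('z', 'Z'):
--         return 'z'
--     if s.startswith('b') and len(s) >= 2:
--         bits = s[1:]
--         if len(bits) == 1 and bits in ('0', '1', 'x', 'z', 'X', 'Z'):
--             return normalize_1bit_val(bits)
--         return 'x'
--     return 'x'
--
-- def rise_edges(tv):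
--     tv = sorted(tv, key=lambda x: x[0])
--     edges, last = [], None
--     for t, v in tv:
--         vv = normalize_1bit_val(v)
--         if vv == '1' and last != '1':
--             edges.append(t)
--         last = vv
--     return edges
-- ===== SOURCE B (Python) =====
-- def normalize_1bit_val(v):
--     if v is None:
--         return 'x'
--     s = str(v)
--     if s in ('0', '1'):
--         return s
--     if s in ('x', 'X'):
--         return 'x'
--     if s in ('z', 'Z'):
--         return 'z'
--     if s.startswith('b') and len(s) >= 2:
--         bits = s[1:]
--         if len(bits) == 1 and bits in ('0', '1', 'x', 'z', 'X', 'Z'):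
--             return normalize_1bit_val(bits)
--         return 'x'
--     return 'x'
--
-- def rise_edges(tv):
--     # Group the time-sorted samples into runs of equal normalized value;
--     # every '1'-run starts a rising edge, so record its first time.
--     s = sorted(tv, key=lambda x: x[0])
--     edges = []
--     i, n = 0, len(s)
--     while i < n:
--         vv = normalize_1bit_val(s[i][1])
--         if vv == '1':
--             edges.append(s[i][0])
--         i += 1
--         while i < n and normalize_1bit_val(s[i][1]) == vv:
--             i += 1
--     return edges
-- ===== Notes on version B (the rewrite author's own statement) =====
-- stated objective: alternative
-- what changed: B replaces A's element-by-element scan with a 'last value' register by a run-grouping pass: it collapses the sorted samples into maximal runs of equal normalized value and records the start time of each '1' run.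
import Mathlib
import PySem

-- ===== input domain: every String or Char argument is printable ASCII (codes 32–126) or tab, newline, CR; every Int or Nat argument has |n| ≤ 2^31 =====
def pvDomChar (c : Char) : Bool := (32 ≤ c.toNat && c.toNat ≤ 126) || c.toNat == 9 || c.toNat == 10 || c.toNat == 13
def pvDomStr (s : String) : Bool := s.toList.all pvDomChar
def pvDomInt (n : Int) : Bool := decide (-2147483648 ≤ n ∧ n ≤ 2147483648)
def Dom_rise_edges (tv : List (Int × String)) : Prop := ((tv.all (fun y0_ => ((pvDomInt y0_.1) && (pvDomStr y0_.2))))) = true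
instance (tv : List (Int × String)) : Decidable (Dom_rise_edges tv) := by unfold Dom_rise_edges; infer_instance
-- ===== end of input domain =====

-- B groups the sorted samples into runs of equal normalized value and records each '1'-run's
-- start time, instead of A's per-element scan with a 'last' register (objective: alternative).

-- ===== PORT A =====
-- shared helper: both Pythons define normalize_1bit_val identically (v is always a str here,
-- so the 'v is None' branch never fires and 's = str(v)' is 'v' itself)
def normalize_1bit_val (v : String) : String :=
  let s := v
  if s = "0" ∨ s = "1" then s
  else if s = "x" ∨ s = "X" then "x"
  else if s = "z" ∨ s = "Z" then "z"
  else if PySem.Str.startswith s "b" = true ∧ 2 ≤ PySem.Str.len s then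
    let bits := PySem.Str.slice s (some 1) none
    if PySem.Str.len bits = 1 ∧ (bits = "0" ∨ bits = "1" ∨ bits = "x" ∨ bits = "z" ∨ bits = "X" ∨ bits = "Z") then
      normalize_1bit_val bits
    else "x"
  else "x"
termination_by v.toList.length
decreasing_by
  rename_i h _
  have hpre : ("b".toList) <+: v.toList := (PySem.Chars.startswith_iff _ _).mp (by
    simpa using h.1)
  have hne : v.toList ≠ [] := by
    intro hnil; rw [hnil] at hpre; simpa using hpre.length_le
  rw [PySem.Str.toList_slice, PySem.Chars.slice_eq_listSlice, PySem.List.slice_from_one]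
  cases hl : v.toList with
  | nil => exact absurd hl hne
  | cons c cs => simp

-- loop body of A's for-loop (state: (edges, last))
def riseStep (st : List Int × Option String) (p : Int × String) : List Int × Option String :=
  let vv := normalize_1bit_val p.2
  ((if vv = "1" ∧ st.2 ≠ some "1" then st.1 ++ [p.1] else st.1), some vv)

def rise_edges (tv : List (Int × String)) : List Int :=
  ((PySem.List.sorted tv (fun x => x.1) false).foldl riseStep ([], none)).1

-- ===== PORT B =====
-- B's outer while-loop: consume one maximal run of equal normalized value per step
def riseRuns : List (Int × String) → List Int
  | [] => []
  | p :: rest =>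
    let vv := normalize_1bit_val p.2
    (if vv = "1" then [p.1] else []) ++
      riseRuns (rest.dropWhile (fun q => normalize_1bit_val q.2 == vv))
termination_by xs => xs.length
decreasing_by
  simp only [List.length_cons]
  exact Nat.lt_succ_of_le (List.length_dropWhile_le _ _)

def rise_edges_alt (tv : List (Int × String)) : List Int :=
  riseRuns (PySem.List.sorted tv (fun x => x.1) false)

-- ===== PRECONDITION & SPEC =====
def Spec_rise_edges (tv : List (Int × String)) (out : List Int) : Prop := out = rise_edges_alt tv
instance (tv : List (Int × String)) (out : List Int) : Decidable (Spec_rise_edges tv out) := by unfold Spec_rise_edges; infer_instance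

-- ===== CLAIM (what is proved, stated in full; the proofs are below) =====
def Claim_equal_rise_edges : Prop := ∀ (tv : List (Int × String)), Dom_rise_edges tv → Spec_rise_edges tv (rise_edges tv)

-- ===== LEMMAS AND PROOFS =====

-- scanning a run of value vv with last = vv leaves the state unchanged
lemma run_absorb (vv : String) (acc : List Int) :
    ∀ run : List (Int × String), (∀ q ∈ run, normalize_1bit_val q.2 = vv) →
      run.foldl riseStep (acc, some vv) = (acc, some vv) := by
  intro run
  induction run with
  | nil => intro _; rfl
  | cons q rest ih =>
    intro h
    have hq : normalize_1bit_val q.2 = vv := h q (by simp)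
    have hrest : ∀ q ∈ rest, normalize_1bit_val q.2 = vv := fun r hr => h r (by simp [hr])
    have hstep : riseStep (acc, some vv) q = (acc, some vv) := by
      simp only [riseStep, hq]
      by_cases h1 : vv = "1" <;> simp [h1]
    simp [List.foldl_cons, hstep, ih hrest]

-- A's scan from state (acc, last) equals acc ++ B's run-grouping, provided the head starts a new run
lemma scan_eq_runs : ∀ (xs : List (Int × String)) (acc : List Int) (last : Option String),
    (∀ p ∈ xs.head?, some (normalize_1bit_val p.2) ≠ last) →
    (xs.foldl riseStep (acc, last)).1 = acc ++ riseRuns xs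
  | [], acc, last, _ => by simp [riseRuns]
  | p :: rest, acc, last, h => by
    have hlast : some (normalize_1bit_val p.2) ≠ last := h p (by simp)
    set vv := normalize_1bit_val p.2 with hvv
    have hstep : riseStep (acc, last) p =
        ((if vv = "1" then acc ++ [p.1] else acc), some vv) := by
      simp only [riseStep, ← hvv]
      by_cases h1 : vv = "1"
      · have : last ≠ some "1" := fun hc => hlast (by rw [hc, h1])
        simp [h1, this]
      · simp [h1]
    have hsplit : rest = rest.takeWhile (fun q => normalize_1bit_val q.2 == vv) ++
        rest.dropWhile (fun q => normalize_1bit_val q.2 == vv) :=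
      (List.takeWhile_append_dropWhile).symm
    have habs : (rest.takeWhile (fun q => normalize_1bit_val q.2 == vv)).foldl riseStep
        ((if vv = "1" then acc ++ [p.1] else acc), some vv) =
        ((if vv = "1" then acc ++ [p.1] else acc), some vv) :=
      run_absorb vv _ _ (fun q hq => by
        have := List.mem_takeWhile_imp hq
        simpa using this)
    have hhead : ∀ q ∈ (rest.dropWhile (fun q => normalize_1bit_val q.2 == vv)).head?,
        some (normalize_1bit_val q.2) ≠ some vv := by
      intro q hq
      cases hd : rest.dropWhile (fun q => normalize_1bit_val q.2 == vv) with
      | nil => simp [hd] at hq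
      | cons r rs =>
        have h0 : 0 < (rest.dropWhile (fun q => normalize_1bit_val q.2 == vv)).length := by
          rw [hd]; simp
        have hr := List.dropWhile_get_zero_not (fun q => normalize_1bit_val q.2 == vv) rest h0
        simp only [hd, List.get_eq_getElem, List.getElem_cons_zero] at hr
        have hq' : r = q := by simpa [hd] using hq
        subst hq'
        simpa using hr
    have hrec := scan_eq_runs (rest.dropWhile (fun q => normalize_1bit_val q.2 == vv))
      (if vv = "1" then acc ++ [p.1] else acc) (some vv) hhead
    calc ((p :: rest).foldl riseStep (acc, last)).1
        = (rest.foldl riseStep ((if vv = "1" then acc ++ [p.1] else acc), some vv)).1 := by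
          rw [List.foldl_cons, hstep]
      _ = acc ++ riseRuns (p :: rest) := by
          conv_lhs => rw [hsplit, List.foldl_append, habs]
          rw [hrec, riseRuns]
          by_cases h1 : vv = "1" <;> simp [h1, ← hvv]
  termination_by xs => xs.length
  decreasing_by
    simp only [List.length_cons]
    exact Nat.lt_succ_of_le (List.length_dropWhile_le _ _)

-- ===== VERDICT (by name: the statement is the Claim_ definition above) =====
theorem rise_edges_spec : Claim_equal_rise_edges := by
  intro tv _
  unfold Spec_rise_edges rise_edges rise_edges_alt
  exact scan_eq_runs _ [] none (by simp)
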